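-- pv_equiv track=rewrite | github.com/reading-stiener/For-the-love-of-algos | hackerrank_sample.py | lotteryCoupons
-- ===== SOURCE A (Python) =====
-- def digit_sum(n):
--     total = 0
--     while n > 0:
--         total += n % 10
--         n //= 10
--     return total
--
-- def lotteryCoupons(n):
--     # Write your code here
--     s_dict = {}
--     most_wins = 1
--     for i in range(1, n+1):
--         tot = digit_sum(i)
--         if s_dict.get(tot, -1) == -1:
--             s_dict[tot] = 1
--         else:
--             s_dict[tot] += 1
--             most_wins = max(s_dict[tot], most_wins)
--     most_win_count = 0
--     for s, winners in s_dict.items():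
--         if winners == most_wins:
--             most_win_count += 1
--     return most_win_count
-- ===== SOURCE B (Python) =====
-- def lotteryCoupons(n):
--     if n <= 0:
--         return 0
--     memo = {0: 0}            # digit sums memoized bottom-up: ds(i) = ds(i//10) + i%10
--     counts = {}
--     for i in range(1, n + 1):
--         s = memo[i // 10] + i % 10
--         memo[i] = s
--         counts[s] = counts.get(s, 0) + 1
--     best = max(counts.values())
--     return sum(1 for v in counts.values() if v == best)
-- ===== Notes on version B (the rewrite author's own statement) =====
-- stated objective: faster
-- what changed: B replaces A's per-element digit-sum while-loop and sentinel-guarded running max by a bottom-up memo table of digit sums (each value derived from the already-memoized value at the number with its last digit stripped), plain counter increments, and a single max/count pass at the end.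
import Mathlib
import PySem

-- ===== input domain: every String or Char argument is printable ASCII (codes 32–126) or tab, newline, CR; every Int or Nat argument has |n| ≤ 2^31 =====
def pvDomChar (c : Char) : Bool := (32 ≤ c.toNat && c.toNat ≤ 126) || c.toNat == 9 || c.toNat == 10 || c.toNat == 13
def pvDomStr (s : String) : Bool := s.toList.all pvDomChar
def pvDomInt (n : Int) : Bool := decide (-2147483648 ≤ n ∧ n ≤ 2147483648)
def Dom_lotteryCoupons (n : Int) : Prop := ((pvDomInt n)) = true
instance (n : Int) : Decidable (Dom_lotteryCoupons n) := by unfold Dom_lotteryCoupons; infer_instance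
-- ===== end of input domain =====

-- B replaces A's per-element digit-sum while-loop and sentinel-guarded running max by a
-- bottom-up memo table of digit sums, plain counter increments, and max/count at the end.

-- ===== PORT A =====
-- 'while n > 0: total += n % 10; n //= 10' of digit_sum
def pvDigitSumLoop (total : Int) (n : Int) : Int :=
  if h : 0 < n then
    pvDigitSumLoop (total + PySem.Int.mod n 10) (PySem.Int.floordiv n 10)
  else total
termination_by n.toNat
decreasing_by
  have h0 : (0:Int) ≤ PySem.Int.floordiv n 10 :=
    (PySem.Int.le_floordiv_iff_mul_le (by omega)).mpr (by omega)
  have h1 : PySem.Int.floordiv n 10 < n :=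
    (PySem.Int.floordiv_lt_iff_lt_mul (by omega)).mpr (by omega)
  omega

def pvDigitSum (n : Int) : Int := pvDigitSumLoop 0 n

-- body of 'for i in range(1, n+1)' in A
def pvAStep (st : PySem.Dict Int Int × Int) (i : Int) : PySem.Dict Int Int × Int :=
  let tot := pvDigitSum i
  if st.1.getD tot (-1) == (-1 : Int) then
    (st.1.insert tot 1, st.2)
  else
    let d := st.1.insert tot (st.1.getD tot 0 + 1)
    (d, max (d.getD tot 0) st.2)

def lotteryCoupons (n : Int) : Int :=
  let st := (PySem.List.pyRange 1 (n + 1) 1).foldl pvAStep (PySem.Dict.empty, 1)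
  st.1.items.foldl (fun acc p => if p.2 == st.2 then acc + 1 else acc) 0

-- ===== PORT B =====
-- body of B's single loop; 'memo[i // 10]' is a lookup that never misses (i//10 < i was
-- already filled), ported as get? with an (unreachable) default 0
def pvBStep (st : PySem.Dict Int Int × PySem.Dict Int Int) (i : Int) :
    PySem.Dict Int Int × PySem.Dict Int Int :=
  let s := (st.1.get? (PySem.Int.floordiv i 10)).getD 0 + PySem.Int.mod i 10
  (st.1.insert i s, st.2.insert s (st.2.getD s 0 + 1))

def lotteryCoupons_alt (n : Int) : Int :=
  if n ≤ 0 then 0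
  else
    let st := (PySem.List.pyRange 1 (n + 1) 1).foldl pvBStep
      ((PySem.Dict.empty).insert 0 0, PySem.Dict.empty)
    match PySem.List.max? st.2.values (fun v => v) with
    | some best => st.2.values.foldl (fun acc v => if v == best then acc + 1 else acc) 0
    | none => 0

-- ===== PRECONDITION & SPEC =====
def Spec_lotteryCoupons (n : Int) (out : Int) : Prop := out = lotteryCoupons_alt n
instance (n : Int) (out : Int) : Decidable (Spec_lotteryCoupons n out) := by unfold Spec_lotteryCoupons; infer_instance

-- ===== CLAIM (what is proved, stated in full; the proofs are below) =====
def Claim_equal_lotteryCoupons : Prop := ∀ (n : Int), Dom_lotteryCoupons n → Spec_lotteryCoupons n (lotteryCoupons n)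

-- ===== LEMMAS AND PROOFS =====

-- digit-sum loop: accumulator shifts out
theorem pvDigitSumLoop_shift_aux : ∀ (m : Nat) (t n : Int), n.toNat ≤ m →
    pvDigitSumLoop t n = t + pvDigitSumLoop 0 n := by
  intro m
  induction m with
  | zero =>
    intro t n hn
    have h : ¬ 0 < n := by omega
    have e1 : pvDigitSumLoop t n = t := by rw [pvDigitSumLoop]; simp [h]
    have e2 : pvDigitSumLoop 0 n = 0 := by rw [pvDigitSumLoop]; simp [h]
    rw [e1, e2]; ring
  | succ m ih =>
    intro t n hn
    by_cases h : 0 < n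
    · have h0 : (0:Int) ≤ PySem.Int.floordiv n 10 :=
        (PySem.Int.le_floordiv_iff_mul_le (by omega)).mpr (by omega)
      have h1 : PySem.Int.floordiv n 10 < n :=
        (PySem.Int.floordiv_lt_iff_lt_mul (by omega)).mpr (by omega)
      have hq : (PySem.Int.floordiv n 10).toNat ≤ m := by omega
      have e1 : pvDigitSumLoop t n
          = pvDigitSumLoop (t + PySem.Int.mod n 10) (PySem.Int.floordiv n 10) := by
        rw [pvDigitSumLoop]; simp [h]
      have e2 : pvDigitSumLoop 0 n
          = pvDigitSumLoop (0 + PySem.Int.mod n 10) (PySem.Int.floordiv n 10) := by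
        rw [pvDigitSumLoop]; simp [h]
      calc pvDigitSumLoop t n
          = (t + PySem.Int.mod n 10) + pvDigitSumLoop 0 (PySem.Int.floordiv n 10) := by
            rw [e1, ih (t + PySem.Int.mod n 10) (PySem.Int.floordiv n 10) hq]
        _ = t + pvDigitSumLoop (0 + PySem.Int.mod n 10) (PySem.Int.floordiv n 10) := by
            rw [ih (0 + PySem.Int.mod n 10) (PySem.Int.floordiv n 10) hq]; ring
        _ = t + pvDigitSumLoop 0 n := by rw [e2]
    · have e1 : pvDigitSumLoop t n = t := by rw [pvDigitSumLoop]; simp [h]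
      have e2 : pvDigitSumLoop 0 n = 0 := by rw [pvDigitSumLoop]; simp [h]
      rw [e1, e2]; ring

theorem pvDigitSumLoop_shift (t n : Int) : pvDigitSumLoop t n = t + pvDigitSumLoop 0 n :=
  pvDigitSumLoop_shift_aux n.toNat t n le_rfl

theorem pvDigitSum_step (i : Int) (h : 0 < i) :
    pvDigitSum i = pvDigitSum (PySem.Int.floordiv i 10) + PySem.Int.mod i 10 := by
  unfold pvDigitSum
  have e : pvDigitSumLoop 0 i
      = pvDigitSumLoop (0 + PySem.Int.mod i 10) (PySem.Int.floordiv i 10) := by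
    rw [pvDigitSumLoop]; simp [h]
  rw [e, pvDigitSumLoop_shift]
  ring

-- running max over a list
theorem pvFoldlMaxPull (l : List Int) (x v : Int) :
    l.foldl max (max x v) = max (l.foldl max x) v := by
  induction l generalizing x with
  | nil => rfl
  | cons a t ih =>
    simp only [List.foldl_cons]
    rw [show max (max x v) a = max (max x a) v by omega, ih]

theorem pvFoldlMaxExtract (l1 l2 : List Int) (a v : Int) :
    (l1 ++ v :: l2).foldl max a = max ((l1 ++ l2).foldl max a) v := by
  rw [List.foldl_append, List.foldl_append, List.foldl_cons, pvFoldlMaxPull]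

-- items of a dict containing key k decompose around its unique entry
theorem pvItemsDecomp (d : PySem.Dict Int Int) (k v : Int)
    (hd : d.keys.Nodup) (h : d.get? k = some v) :
    ∃ l1 l2, d.items = l1 ++ (k, v) :: l2 ∧ (∀ p ∈ l1, p.1 ≠ k) ∧ (∀ p ∈ l2, p.1 ≠ k) := by
  have hm : (k, v) ∈ d.items := PySem.Dict.mem_items_of_get?_eq_some d h
  obtain ⟨l1, l2, hsplit⟩ := List.append_of_mem hm
  have hk : (d.items.map Prod.fst).Nodup := hd
  rw [hsplit, List.map_append, List.map_cons, List.nodup_append] at hk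
  obtain ⟨hn1, hn2, hdis⟩ := hk
  refine ⟨l1, l2, hsplit, ?_, ?_⟩
  · intro p hp hpk
    have hmem : p.1 ∈ l1.map Prod.fst := List.mem_map_of_mem (f := Prod.fst) hp
    rw [hpk] at hmem
    exact hdis k hmem k List.mem_cons_self rfl
  · intro p hp hpk
    have hmem : p.1 ∈ l2.map Prod.fst := List.mem_map_of_mem (f := Prod.fst) hp
    rw [hpk] at hmem
    exact (List.nodup_cons.mp hn2).1 hmem

theorem pvItemsInsertNeNil (d : PySem.Dict Int Int) (k v : Int) :
    (d.insert k v).items ≠ [] := by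
  rw [PySem.Dict.items_insert]
  by_cases hc : d.contains k = true
  · have hk : k ∈ d.items.map Prod.fst := by
      have := (PySem.Dict.contains_iff_mem_keys d k).mp hc
      simpa [PySem.Dict.keys] using this
    simp only [hc, if_true]
    intro hnil
    rw [List.map_eq_nil_iff.mpr (by simpa using hnil)] at hk
    exact (List.not_mem_nil) hk
  · simp [hc]

-- the two loops, run to k
def pvARun (k : Nat) : PySem.Dict Int Int × Int :=
  (PySem.List.pyRange 1 ((k:Int) + 1) 1).foldl pvAStep (PySem.Dict.empty, 1)

def pvBRun (k : Nat) : PySem.Dict Int Int × PySem.Dict Int Int :=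
  (PySem.List.pyRange 1 ((k:Int) + 1) 1).foldl pvBStep ((PySem.Dict.empty).insert 0 0, PySem.Dict.empty)

theorem pvARun_succ (k : Nat) : pvARun (k+1) = pvAStep (pvARun k) ((k:Int)+1) := by
  unfold pvARun
  rw [show (((k+1:Nat)):Int) + 1 = ((k:Int)+1) + 1 by push_cast; ring,
      PySem.List.pyRange_one_succ_right (by omega), List.foldl_append]
  rfl

theorem pvBRun_succ (k : Nat) : pvBRun (k+1) = pvBStep (pvBRun k) ((k:Int)+1) := by
  unfold pvBRun
  rw [show (((k+1:Nat)):Int) + 1 = ((k:Int)+1) + 1 by push_cast; ring,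
      PySem.List.pyRange_one_succ_right (by omega), List.foldl_append]
  rfl

-- the joint loop invariant
def pvInv (k : Nat) : Prop :=
  (pvBRun k).2 = (pvARun k).1 ∧
  (pvARun k).1.keys.Nodup ∧
  (pvARun k).2 = (pvARun k).1.values.foldl max 1 ∧
  (∀ v ∈ (pvARun k).1.values, 1 ≤ v) ∧
  (∀ j : Int, 0 ≤ j → j ≤ (k:Int) → (pvBRun k).1.get? j = some (pvDigitSum j))

theorem pvInv_holds (k : Nat) : pvInv k := by
  induction k with
  | zero =>
    have hnil : PySem.List.pyRange 1 (((0:Nat):Int) + 1) 1 = [] :=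
      PySem.List.pyRange_one_eq_nil (by norm_num)
    have hA : pvARun 0 = (PySem.Dict.empty, 1) := by
      simp only [pvARun, hnil, List.foldl_nil]
    have hB : pvBRun 0 = ((PySem.Dict.empty).insert 0 0, PySem.Dict.empty) := by
      simp only [pvBRun, hnil, List.foldl_nil]
    have hds0 : pvDigitSum 0 = 0 := by
      rw [pvDigitSum, pvDigitSumLoop]; norm_num
    refine ⟨?_, ?_, ?_, ?_, ?_⟩
    · rw [hA, hB]
    · rw [hA]; exact PySem.Dict.nodup_keys_empty
    · rw [hA]; rfl
    · rw [hA]; intro v hv; exact absurd hv (List.not_mem_nil)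
    · intro j h0 h1
      have hj : j = 0 := by omega
      subst hj
      rw [hB, PySem.Dict.get?_insert_self, hds0]
  | succ k ih =>
    obtain ⟨hBA, hnd, hm, hv1, hmemo⟩ := ih
    have hi : (0:Int) < (k:Int) + 1 := by omega
    have hq0 : (0:Int) ≤ PySem.Int.floordiv ((k:Int)+1) 10 :=
      (PySem.Int.le_floordiv_iff_mul_le (by omega)).mpr (by omega)
    have hq1 : PySem.Int.floordiv ((k:Int)+1) 10 < (k:Int)+1 :=
      (PySem.Int.floordiv_lt_iff_lt_mul (by omega)).mpr (by omega)
    have hget : (pvBRun k).1.get? (PySem.Int.floordiv ((k:Int)+1) 10)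
        = some (pvDigitSum (PySem.Int.floordiv ((k:Int)+1) 10)) :=
      hmemo _ hq0 (by omega)
    have hstepB : pvBStep (pvBRun k) ((k:Int)+1) =
        ((pvBRun k).1.insert ((k:Int)+1) (pvDigitSum ((k:Int)+1)),
         (pvBRun k).2.insert (pvDigitSum ((k:Int)+1))
           ((pvBRun k).2.getD (pvDigitSum ((k:Int)+1)) 0 + 1)) := by
      simp only [pvBStep, hget, Option.getD_some, ← pvDigitSum_step ((k:Int)+1) hi]
    have hmemo' : ∀ j : Int, 0 ≤ j → j ≤ ((k:Int)+1) →
        ((pvBRun k).1.insert ((k:Int)+1) (pvDigitSum ((k:Int)+1))).get? j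
          = some (pvDigitSum j) := by
      intro j h0 h1
      rw [PySem.Dict.get?_insert]
      by_cases hj : j = (k:Int)+1
      · subst hj; simp
      · rw [if_neg hj]; exact hmemo j h0 (by omega)
    cases hA : (pvARun k).1.get? (pvDigitSum ((k:Int)+1)) with
    | none =>
      have hcontains : (pvARun k).1.contains (pvDigitSum ((k:Int)+1)) = false :=
        (PySem.Dict.get?_eq_none_iff_contains _ _).mp hA
      have hstepA : pvAStep (pvARun k) ((k:Int)+1) =
          ((pvARun k).1.insert (pvDigitSum ((k:Int)+1)) 1, (pvARun k).2) := by
        simp only [pvAStep]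
        rw [PySem.Dict.getD_of_get?_eq_none _ _ hA]
        simp
      have hvals : ((pvARun k).1.insert (pvDigitSum ((k:Int)+1)) 1).values
          = (pvARun k).1.values ++ [1] := by
        show ((pvARun k).1.insert (pvDigitSum ((k:Int)+1)) 1).items.map Prod.snd = _
        rw [PySem.Dict.items_insert_of_not_contains _ _ hcontains, List.map_append]
        rfl
      refine ⟨?_, ?_, ?_, ?_, ?_⟩
      · rw [pvARun_succ, pvBRun_succ, hstepA, hstepB, hBA,
            PySem.Dict.getD_of_get?_eq_none _ _ hA]
        norm_num
      · rw [pvARun_succ, hstepA]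
        exact PySem.Dict.nodup_keys_insert _ _ _ hnd
      · rw [pvARun_succ, hstepA, hvals, List.foldl_append, List.foldl_cons, List.foldl_nil]
        have hle : (1:Int) ≤ (pvARun k).1.values.foldl max 1 :=
          (PySem.List.le_foldl_max _ _).1
        rw [max_eq_left hle]
        exact hm
      · rw [pvARun_succ, hstepA, hvals]
        intro v hv
        rcases List.mem_append.mp hv with h | h
        · exact hv1 v h
        · simp at h; omega
      · rw [pvBRun_succ, hstepB]
        exact hmemo'
    | some v =>
      have hvmem : v ∈ (pvARun k).1.values :=
        List.mem_map_of_mem (f := Prod.snd) (PySem.Dict.mem_items_of_get?_eq_some _ hA)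
      have hv : 1 ≤ v := hv1 v hvmem
      have hgetD : (pvARun k).1.getD (pvDigitSum ((k:Int)+1)) (-1) = v :=
        PySem.Dict.getD_of_get?_eq_some _ _ hA
      have hgetD0 : (pvARun k).1.getD (pvDigitSum ((k:Int)+1)) 0 = v :=
        PySem.Dict.getD_of_get?_eq_some _ _ hA
      have hcond : ((pvARun k).1.getD (pvDigitSum ((k:Int)+1)) (-1) == (-1:Int)) = false := by
        rw [hgetD]; simp; omega
      have hcontains : (pvARun k).1.contains (pvDigitSum ((k:Int)+1)) = true :=
        (PySem.Dict.contains_iff_mem_keys _ _).mpr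
          (List.mem_map_of_mem (f := Prod.fst) (PySem.Dict.mem_items_of_get?_eq_some _ hA))
      have hstepA : pvAStep (pvARun k) ((k:Int)+1) =
          ((pvARun k).1.insert (pvDigitSum ((k:Int)+1)) (v+1), max (v+1) (pvARun k).2) := by
        simp only [pvAStep, hcond, Bool.false_eq_true, if_false, hgetD0,
          PySem.Dict.getD_insert_self]
      obtain ⟨l1, l2, hsp, h1, h2⟩ := pvItemsDecomp _ _ _ hnd hA
      have hitems' : ((pvARun k).1.insert (pvDigitSum ((k:Int)+1)) (v+1)).items
          = l1 ++ (pvDigitSum ((k:Int)+1), v+1) :: l2 := by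
        rw [PySem.Dict.items_insert_of_contains _ _ hcontains, hsp, List.map_append,
            List.map_cons]
        have e1 : l1.map (fun p => if (p.1 == pvDigitSum ((k:Int)+1)) = true
            then (pvDigitSum ((k:Int)+1), v+1) else p) = l1 := by
          refine (List.map_congr_left ?_).trans (List.map_id _)
          intro p hp
          simp [h1 p hp]
        have e2 : l2.map (fun p => if (p.1 == pvDigitSum ((k:Int)+1)) = true
            then (pvDigitSum ((k:Int)+1), v+1) else p) = l2 := by
          refine (List.map_congr_left ?_).trans (List.map_id _)
          intro p hp
          simp [h2 p hp]
        rw [e1, e2]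
        simp
      have hvals : ((pvARun k).1.insert (pvDigitSum ((k:Int)+1)) (v+1)).values
          = l1.map Prod.snd ++ (v+1) :: l2.map Prod.snd := by
        show ((pvARun k).1.insert (pvDigitSum ((k:Int)+1)) (v+1)).items.map Prod.snd = _
        rw [hitems', List.map_append, List.map_cons]
      have hvalsold : (pvARun k).1.values
          = l1.map Prod.snd ++ v :: l2.map Prod.snd := by
        show (pvARun k).1.items.map Prod.snd = _
        rw [hsp, List.map_append, List.map_cons]
      refine ⟨?_, ?_, ?_, ?_, ?_⟩
      · rw [pvARun_succ, pvBRun_succ, hstepA, hstepB, hBA, hgetD0]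
      · rw [pvARun_succ, hstepA]
        exact PySem.Dict.nodup_keys_insert _ _ _ hnd
      · rw [pvARun_succ, hstepA]
        show max (v+1) (pvARun k).2 = _
        rw [hvals, pvFoldlMaxExtract, hm, hvalsold, pvFoldlMaxExtract]
        omega
      · rw [pvARun_succ, hstepA]
        intro w hw
        rcases PySem.Dict.mem_values_insert _ _ _ _ hw with h | h
        · omega
        · exact hv1 w h
      · rw [pvBRun_succ, hstepB]
        exact hmemo'

theorem pvARun_items_ne_nil (k : Nat) (h : 1 ≤ k) : (pvARun k).1.items ≠ [] := by
  obtain ⟨k', rfl⟩ : ∃ k', k = k' + 1 := ⟨k - 1, by omega⟩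
  rw [pvARun_succ]
  simp only [pvAStep]
  by_cases hc : ((pvARun k').1.getD (pvDigitSum ((k':Int)+1)) (-1) == (-1:Int)) = true
  · rw [if_pos hc]
    exact pvItemsInsertNeNil _ _ _
  · rw [if_neg hc]
    exact pvItemsInsertNeNil _ _ _

theorem pvMain_pos (k : Nat) (h1 : 1 ≤ k) :
    lotteryCoupons ((k:Int)) = lotteryCoupons_alt ((k:Int)) := by
  obtain ⟨hBA, hnd, hm, hv1, -⟩ := pvInv_holds k
  have hne : (pvARun k).1.items ≠ [] := pvARun_items_ne_nil k h1
  simp only [lotteryCoupons, lotteryCoupons_alt, if_neg (by omega : ¬ (k:Int) ≤ 0)]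
  have ea : (PySem.List.pyRange 1 ((k:Int) + 1) 1).foldl pvAStep (PySem.Dict.empty, 1)
      = pvARun k := rfl
  have eb : (PySem.List.pyRange 1 ((k:Int) + 1) 1).foldl pvBStep
      ((PySem.Dict.empty).insert 0 0, PySem.Dict.empty) = pvBRun k := rfl
  rw [ea, eb, hBA]
  obtain ⟨v0, t, hvals⟩ : ∃ v0 t, (pvARun k).1.values = v0 :: t := by
    cases hv : (pvARun k).1.values with
    | nil =>
      exfalso
      apply hne
      have := congrArg List.length hv
      simp only [PySem.Dict.values] at this
      simpa using List.eq_nil_of_length_eq_zero (by simpa using this)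
    | cons a l => exact ⟨a, l, rfl⟩
  have hv0 : (1:Int) ≤ v0 := hv1 v0 (by rw [hvals]; exact List.mem_cons_self)
  rw [hvals, PySem.List.max?_id_cons]
  have hbest : (pvARun k).2 = t.foldl max v0 := by
    rw [hm, hvals, List.foldl_cons, max_eq_right hv0]
  show List.foldl (fun acc p => if (p.2 == (pvARun k).2) = true then acc + 1 else acc) 0
        (pvARun k).1.items
      = List.foldl (fun acc v => if (v == t.foldl max v0) = true then acc + 1 else acc) 0
        (v0 :: t)
  have e1 := PySem.List.foldl_if_add_one
    (fun (p : Int × Int) => p.2 == (pvARun k).2) (pvARun k).1.items 0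
  have e2 := PySem.List.foldl_if_add_one
    (fun (w : Int) => w == t.foldl max v0) (v0 :: t) 0
  rw [e1, e2]
  have hcnt : List.countP (fun (p : Int × Int) => p.2 == (pvARun k).2) (pvARun k).1.items
      = List.countP (fun (w : Int) => w == t.foldl max v0) (v0 :: t) := by
    rw [← hvals, ← hbest]
    show _ = List.countP _ ((pvARun k).1.items.map Prod.snd)
    rw [List.countP_map]
    rfl
  rw [hcnt]

-- ===== VERDICT (by name: the statement is the Claim_ definition above) =====
theorem lotteryCoupons_spec : Claim_equal_lotteryCoupons := by
  unfold Claim_equal_lotteryCoupons Spec_lotteryCoupons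
  intro n _
  by_cases hn : n ≤ 0
  · simp only [lotteryCoupons, lotteryCoupons_alt, if_pos hn,
      PySem.List.pyRange_one_eq_nil (by omega : n + 1 ≤ 1), List.foldl_nil]
    rfl
  · have hk : n = ((n.toNat : Int)) := by omega
    rw [hk]
    exact pvMain_pos n.toNat (by omega)
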